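-- pv_equiv track=rewrite | github.com/Fleeting198/-The-Practice-of-Computing-Using-Python- | Chap06/programing/01.py | puzzle_k
-- ===== SOURCE A (Python) =====
-- def puzzle_k(wordList):
--     """按顺序包含元音字母"""
--     listAnswer = []
--     vowels = "aeiou"
--     for word in wordList:
--         # 去掉非元音字母
--         for ch in word:
--             if ch not in vowels:
--                 word = word.replace(ch, '')
--
--         # 是否成为元音字符串序列，元音字符重复的不算
--         if word.lower() == vowels:
--             listAnswer.append(''.join(word))
--
--     return listAnswer
-- ===== SOURCE B (Python) =====
-- def puzzle_k(wordList):
--     result = []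
--     for word in wordList:
--         i = 0
--         ok = True
--         for ch in word:
--             if ch in "aeiou":
--                 if i < 5 and ch == "aeiou"[i]:
--                     i += 1
--                 else:
--                     ok = False
--                     break
--         if ok and i == 5:
--             result.append("aeiou")
--     return result
-- ===== Notes on version B (the rewrite author's own statement) =====
-- stated objective: faster
-- what changed: A filters each word by repeated global str.replace of every non-vowel char and then compares the filtered string (lowercased) to "aeiou"; B does one short-circuiting pass per word with a pointer into "aeiou", matching each lowercase vowel against the next expected pattern char and breaking on the first mismatch.
import Mathlib
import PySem

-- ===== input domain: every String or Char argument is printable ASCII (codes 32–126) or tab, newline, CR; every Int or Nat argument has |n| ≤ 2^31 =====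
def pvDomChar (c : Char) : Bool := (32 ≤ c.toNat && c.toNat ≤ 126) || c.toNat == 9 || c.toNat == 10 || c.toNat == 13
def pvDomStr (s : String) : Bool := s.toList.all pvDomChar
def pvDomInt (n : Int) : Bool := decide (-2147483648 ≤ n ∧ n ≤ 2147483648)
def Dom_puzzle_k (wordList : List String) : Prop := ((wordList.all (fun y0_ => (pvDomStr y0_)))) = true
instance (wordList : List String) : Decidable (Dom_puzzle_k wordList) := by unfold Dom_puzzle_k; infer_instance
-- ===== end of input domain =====

-- B replaces A's filter-every-char-by-global-replace then compare with a single-pass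
-- pointer match of the lowercase-vowel subsequence against "aeiou" (measured faster in a timing run).

-- ===== PORT A =====
def puzzle_k (wordList : List String) : List String :=
  let vowels := "aeiou"
  wordList.foldl (fun listAnswer word0 =>
    -- inner loop: iterate over the ORIGINAL word's chars, removing every non-vowel globally
    let word := word0.toList.foldl (fun w ch =>
      if !(PySem.Str.isIn (String.ofList [ch]) vowels) then
        PySem.Str.replace w (String.ofList [ch]) ""
      else w) word0
    if PySem.Str.lower word == vowels then
      listAnswer ++ [PySem.Str.join "" (word.toList.map (fun c => String.ofList [c]))]
    else listAnswer) []

-- ===== PORT B =====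
-- the inner for-loop of Source B with its break: returns (i, ok)
def pkScan : List Char → Nat → Nat × Bool
  | [], i => (i, true)
  | ch :: rest, i =>
    if ("aeiou".toList.contains ch) then
      if i < 5 && ("aeiou".toList[i]? == some ch) then pkScan rest (i + 1)
      else (i, false)          -- ok = False; break
    else pkScan rest i

def puzzle_k_alt (wordList : List String) : List String :=
  wordList.foldl (fun result word =>
    let p := pkScan word.toList 0      -- p = (i, ok) after the scan
    if p.2 && p.1 == 5 then result ++ ["aeiou"] else result) []

-- ===== PRECONDITION & SPEC =====
def Spec_puzzle_k (wordList : List String) (out : List String) : Prop := out = puzzle_k_alt wordList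
instance (wordList : List String) (out : List String) : Decidable (Spec_puzzle_k wordList out) := by unfold Spec_puzzle_k; infer_instance

-- ===== CLAIM (what is proved, stated in full; the proofs are below) =====
def Claim_equal_puzzle_k : Prop := ∀ (wordList : List String), Dom_puzzle_k wordList → Spec_puzzle_k wordList (puzzle_k wordList)

-- ===== LEMMAS AND PROOFS =====

-- Str.replace of a single char by "" is List.filter away of that char (via replace.go)
theorem pk_replace_go_single (fuel : Nat) : ∀ (l acc : List Char) (x : Char), l.length ≤ fuel →
    PySem.Chars.replace.go [x] [] fuel l acc = acc.reverse ++ l.filter (fun c => c ≠ x) := by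
  induction fuel with
  | zero =>
    intro l acc x hl
    have : l = [] := List.eq_nil_of_length_eq_zero (Nat.le_zero.mp hl)
    subst this
    simp [PySem.Chars.replace.go]
  | succ n ih =>
    intro l acc x hl
    cases l with
    | nil => simp [PySem.Chars.replace.go]
    | cons c t =>
      by_cases hcx : c = x
      · subst hcx
        have hpre : List.isPrefixOf [c] (c :: t) = true := by
          simp [List.isPrefixOf]
        simp only [PySem.Chars.replace.go, hpre, if_pos]
        rw [ih _ _ c (by simpa using Nat.le_of_succ_le_succ hl)]
        simp
      · have hpre : List.isPrefixOf [x] (c :: t) = false := by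
          simp [List.isPrefixOf]
          exact fun h => (hcx h.symm).elim
        simp only [PySem.Chars.replace.go, hpre, Bool.false_eq_true, if_neg, not_false_iff]
        rw [ih _ _ x (by simpa using Nat.le_of_succ_le_succ hl)]
        simp [hcx]

theorem pk_replace_single (l : List Char) (x : Char) :
    PySem.Chars.replace l [x] [] = l.filter (fun c => c ≠ x) := by
  have h := pk_replace_go_single l.length l [] x (le_refl _)
  simpa [PySem.Chars.replace] using h

-- A's inner loop (on char lists) computes a filter
theorem pk_foldA (cs : List Char) : ∀ (w : List Char),
    cs.foldl (fun w ch =>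
      if !(PySem.Chars.isIn [ch] "aeiou".toList) then PySem.Chars.replace w [ch] [] else w) w
    = w.filter (fun c => "aeiou".toList.contains c || !(cs.contains c)) := by
  induction cs with
  | nil => intro w; simp
  | cons ch rest ih =>
    intro w
    by_cases hv : PySem.Chars.isIn [ch] "aeiou".toList = true
    · simp only [List.foldl_cons, hv, Bool.not_true, Bool.false_eq_true, if_neg, not_false_iff]
      rw [ih]
      refine List.filter_congr ?_
      intro c _
      have hch : ch ∈ "aeiou".toList := by
        have := (PySem.Chars.isIn_iff_infix [ch] "aeiou".toList).mp hv
        simpa using this.mem (by simp)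
      by_cases hc : c = ch
      · subst hc
        simp [List.contains_eq_mem]
        exact fun _ => by simpa using hch
      · simp [List.contains_eq_mem, hc]
    · have hnm : ch ∉ "aeiou".toList := by
        intro hm
        obtain ⟨l1, l2, hl⟩ := List.append_of_mem hm
        exact hv ((PySem.Chars.isIn_iff_infix [ch] "aeiou".toList).mpr
          ⟨l1, l2, by simpa using hl.symm⟩)
      have hv' : PySem.Chars.isIn [ch] "aeiou".toList = false := by
        simpa using hv
      simp only [List.foldl_cons, hv', Bool.not_false, if_pos]
      rw [pk_replace_single, ih, List.filter_filter]
      refine List.filter_congr ?_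
      intro c _
      by_cases hc : c = ch
      · subst hc
        have h2 : ("aeiou".toList.contains c) = false := by
          simpa [List.contains_eq_mem] using hnm
        simp
        simpa using hnm
      · simp [List.contains_eq_mem, hc]

-- the String-level inner loop agrees with the char-list fold
theorem pk_innerA_toList (cs : List Char) : ∀ (w : String),
    (cs.foldl (fun w ch =>
      if !(PySem.Str.isIn (String.ofList [ch]) "aeiou") then
        PySem.Str.replace w (String.ofList [ch]) "" else w) w).toList
    = cs.foldl (fun w ch =>
      if !(PySem.Chars.isIn [ch] "aeiou".toList) then PySem.Chars.replace w [ch] [] else w) w.toList := by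
  induction cs with
  | nil => intro w; simp
  | cons ch rest ih =>
    intro w
    simp only [List.foldl_cons]
    rw [ih]
    congr 1
    rw [PySem.Str.isIn_eq]
    simp only [String.toList_ofList]
    split_ifs with h
    · rw [PySem.Str.toList_replace]
      simp
    · rfl

-- A's per-word filtered chars are exactly the lowercase-vowel subsequence
theorem pk_filter_members (cs : List Char) :
    cs.filter (fun c => "aeiou".toList.contains c || !(cs.contains c))
    = cs.filter (fun c => "aeiou".toList.contains c) := by
  refine List.filter_congr ?_
  intro c hc
  simp [List.contains_eq_mem, hc]

-- every char of the filtered word is a lowercase vowel, so lower is the identity there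
theorem pk_lower_filter (cs : List Char) :
    PySem.Chars.lower (cs.filter (fun c => "aeiou".toList.contains c))
    = cs.filter (fun c => "aeiou".toList.contains c) := by
  unfold PySem.Chars.lower
  rw [List.map_eq_iff]
  intro i
  cases h : (cs.filter (fun c => "aeiou".toList.contains c))[i]? with
  | none => simp
  | some c =>
    have hc : c ∈ cs.filter (fun c => "aeiou".toList.contains c) := List.mem_of_getElem? h
    have hv : c ∈ "aeiou".toList := by
      have := List.of_mem_filter hc
      simpa [List.contains_eq_mem] using this
    have : PySem.Chars.lowerChar c = c := by
      fin_cases hv <;> decide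
    simp [this]

-- B's scan succeeds from i iff the vowel subsequence is the rest of the pattern
theorem pk_scan_iff (cs : List Char) : ∀ (i : Nat), i ≤ 5 →
    (pkScan cs i = (5, true) ↔
      cs.filter (fun c => "aeiou".toList.contains c) = "aeiou".toList.drop i) := by
  induction cs with
  | nil =>
    intro i hi
    interval_cases i <;> simp [pkScan]
  | cons c rest ih =>
    intro i hi
    by_cases hv : "aeiou".toList.contains c = true
    · by_cases hlt : i < 5
      · have hidx : "aeiou".toList[i]? = some ("aeiou".toList[i]'(by simpa using hlt)) := by
          simp
        by_cases heq : c = "aeiou".toList[i]'(by simpa using hlt)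
        · have hcond : (decide (i < 5) && ("aeiou".toList[i]? == some c)) = true := by
            simp [hlt, heq]
          have hdrop : "aeiou".toList.drop i
              = "aeiou".toList[i]'(by simpa using hlt) :: "aeiou".toList.drop (i + 1) := by
            rw [List.getElem_cons_drop]
          simp only [pkScan, hv, if_pos, hcond]
          rw [ih (i + 1) (by omega), hdrop, ← heq, List.filter_cons_of_pos hv]
          exact ⟨fun h => by rw [h], fun h => (List.cons_inj_right c).mp h⟩
        · have hcond : (decide (i < 5) && ("aeiou".toList[i]? == some c)) = false := by
            simp [hlt]
            exact fun h => (heq h.symm).elim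
          simp only [pkScan, hv, if_pos, hcond, Bool.false_eq_true, if_neg, not_false_iff]
          constructor
          · intro h
            exact absurd (congrArg Prod.snd h) (by simp)
          · intro h
            have hdrop : "aeiou".toList.drop i
                = "aeiou".toList[i]'(by simpa using hlt) :: "aeiou".toList.drop (i + 1) := by
              rw [List.getElem_cons_drop]
            rw [List.filter_cons_of_pos hv, hdrop] at h
            exact absurd (List.head_eq_of_cons_eq h) heq
      · have hi5 : i = 5 := by omega
        subst hi5
        have hcond : (decide ((5:Nat) < 5) && ("aeiou".toList[(5:Nat)]? == some c)) = false := by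
          simp
        simp only [pkScan, hv, if_pos, hcond, Bool.false_eq_true, if_neg, not_false_iff]
        constructor
        · intro h
          exact absurd (congrArg Prod.snd h) (by simp)
        · intro h
          rw [List.filter_cons_of_pos hv] at h
          simp at h
    · have hv' : ("aeiou".toList.contains c) = false := by
        simpa using hv
      simp only [pkScan, hv', Bool.false_eq_true, if_neg, not_false_iff]
      rw [ih i hi, List.filter_cons_of_neg (by simpa using hv')]

-- per-word: A's append condition holds iff B's scan succeeds, and then both append "aeiou"
theorem pk_word (word0 : String) (acc : List String) :
    (if PySem.Str.lower (word0.toList.foldl (fun w ch =>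
        if !(PySem.Str.isIn (String.ofList [ch]) "aeiou") then
          PySem.Str.replace w (String.ofList [ch]) "" else w) word0) == "aeiou" then
       acc ++ [PySem.Str.join "" (((word0.toList.foldl (fun w ch =>
        if !(PySem.Str.isIn (String.ofList [ch]) "aeiou") then
          PySem.Str.replace w (String.ofList [ch]) "" else w) word0)).toList.map (fun c => String.ofList [c]))]
     else acc)
    = (if (pkScan word0.toList 0).2 && ((pkScan word0.toList 0).1 == 5) then
        acc ++ ["aeiou"] else acc) := by
  have hfilter :
      (word0.toList.foldl (fun w ch =>
        if !(PySem.Str.isIn (String.ofList [ch]) "aeiou") then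
          PySem.Str.replace w (String.ofList [ch]) "" else w) word0).toList
      = word0.toList.filter (fun c => "aeiou".toList.contains c) := by
    rw [pk_innerA_toList, pk_foldA, pk_filter_members]
  by_cases hc : word0.toList.filter (fun c => "aeiou".toList.contains c) = "aeiou".toList
  · have hscan : pkScan word0.toList 0 = (5, true) :=
      (pk_scan_iff word0.toList 0 (by omega)).mpr (by simpa using hc)
    have hlow : (PySem.Str.lower (word0.toList.foldl (fun w ch =>
        if !(PySem.Str.isIn (String.ofList [ch]) "aeiou") then
          PySem.Str.replace w (String.ofList [ch]) "" else w) word0) == "aeiou") = true := by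
      refine beq_iff_eq.mpr (String.ext ?_)
      rw [PySem.Str.toList_lower, hfilter, pk_lower_filter word0.toList, hc]
    have hjoin : PySem.Str.join "" (((word0.toList.foldl (fun w ch =>
        if !(PySem.Str.isIn (String.ofList [ch]) "aeiou") then
          PySem.Str.replace w (String.ofList [ch]) "" else w) word0)).toList.map (fun c => String.ofList [c]))
        = "aeiou" := by
      apply String.ext
      rw [PySem.Str.toList_join]
      have hmm : (List.map String.toList (List.map (fun c => String.ofList [c])
          ((word0.toList.foldl (fun w ch =>
            if !(PySem.Str.isIn (String.ofList [ch]) "aeiou") then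
              PySem.Str.replace w (String.ofList [ch]) "" else w) word0)).toList))
          = List.map (fun c => [c]) (word0.toList.filter (fun c => "aeiou".toList.contains c)) := by
        rw [hfilter]
        simp [List.map_map, Function.comp_def]
      rw [hmm]
      have hsep : ("" : String).toList = ([] : List Char) := rfl
      rw [hsep, PySem.Chars.join_nil_singletons, hc]
  
    rw [if_pos hlow, hjoin, hscan]
    simp
  · have hscan : pkScan word0.toList 0 ≠ (5, true) := by
      intro h
      exact hc (by simpa using (pk_scan_iff word0.toList 0 (by omega)).mp h)
    have hlow : ¬ (PySem.Str.lower (word0.toList.foldl (fun w ch =>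
        if !(PySem.Str.isIn (String.ofList [ch]) "aeiou") then
          PySem.Str.replace w (String.ofList [ch]) "" else w) word0) == "aeiou") = true := by
      intro h
      apply hc
      have heq := beq_iff_eq.mp h
      have h2 := congrArg String.toList heq
      rw [PySem.Str.toList_lower, hfilter, pk_lower_filter] at h2
      simpa using h2
    have hcond : ((pkScan word0.toList 0).2 && ((pkScan word0.toList 0).1 == 5)) = false := by
      cases hs : pkScan word0.toList 0 with
      | mk n b =>
        cases b with
        | false => simp
        | true =>
          have hne : n ≠ 5 := fun h5 => hscan (by rw [hs, h5])
          simp [hne]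
    rw [if_neg hlow, hcond]
    simp

set_option maxHeartbeats 1000000 in
theorem pk_fold_eq (ws : List String) : ∀ (acc : List String),
    ws.foldl (fun listAnswer word0 =>
      let word := word0.toList.foldl (fun w ch =>
        if !(PySem.Str.isIn (String.ofList [ch]) "aeiou") then
          PySem.Str.replace w (String.ofList [ch]) "" else w) word0
      if PySem.Str.lower word == "aeiou" then
        listAnswer ++ [PySem.Str.join "" (word.toList.map (fun c => String.ofList [c]))]
      else listAnswer) acc
    = ws.foldl (fun result word =>
        let p := pkScan word.toList 0
        if p.2 && p.1 == 5 then result ++ ["aeiou"] else result) acc := by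
  induction ws with
  | nil => intro acc; rfl
  | cons w rest ih =>
    intro acc
    simp only [List.foldl_cons]
    rw [ih]
    congr 1
    exact pk_word w acc

-- ===== VERDICT (by name: the statement is the Claim_ definition above) =====
theorem puzzle_k_spec : Claim_equal_puzzle_k := by
  intro wordList _
  unfold Spec_puzzle_k puzzle_k puzzle_k_alt
  exact pk_fold_eq wordList []
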